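-- pv_equiv track=rewrite | github.com/BradenM/aws-connect-vanify | backend/vanify/convert.py | find_word_substrings_with_chars
-- ===== SOURCE A (Python) =====
-- def find_word_substrings_with_chars(value: str):
--     """Find all word substrings and chars from string.
--
--     Args:
--         value: string to extract from.
--
--     Examples:
--         >>> VanifiedResult.find_word_substrings_with_chars('1800123APPLE')
--         ['A', 'AP', 'APP', 'APPL', 'APPLE']
--
--     Returns:
--         List of word substrings and chars.
--
--     """
--
--     all_substrings = []
--     substring = ""
--     len_word = len(value)
--     for index, char in enumerate(value):
--         if char.isalpha():
--             substring += char
--             if index == len_word - 1 or not value[index + 1].isdigit():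
--                 all_substrings.append(substring)
--         else:
--             substring = ""
--     return all_substrings
-- ===== SOURCE B (Python) =====
-- def find_word_substrings_with_chars(value: str):
--     """Emit growing prefixes of each maximal alphabetic run; the full-run
--     prefix is emitted only when the run is not immediately followed by a digit."""
--     out = []
--     i, n = 0, len(value)
--     while i < n:
--         if not value[i].isalpha():
--             i += 1
--             continue
--         j = i
--         while j < n and value[j].isalpha():
--             j += 1
--         run = value[i:j]
--         for k in range(1, len(run)):
--             out.append(run[:k])
--         if j == n or not value[j].isdigit():
--             out.append(run)
--         i = j
--     return out
-- ===== Notes on version B (the rewrite author's own statement) =====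
-- stated objective: alternative
-- what changed: Replaces A's single character-by-character pass with a growing-substring accumulator and a lookahead index into the whole string by a run-based decomposition: find each maximal alphabetic run with a two-level scan, emit its growing prefixes by slicing, gating only the full-run prefix on the character after the run.
import Mathlib
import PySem

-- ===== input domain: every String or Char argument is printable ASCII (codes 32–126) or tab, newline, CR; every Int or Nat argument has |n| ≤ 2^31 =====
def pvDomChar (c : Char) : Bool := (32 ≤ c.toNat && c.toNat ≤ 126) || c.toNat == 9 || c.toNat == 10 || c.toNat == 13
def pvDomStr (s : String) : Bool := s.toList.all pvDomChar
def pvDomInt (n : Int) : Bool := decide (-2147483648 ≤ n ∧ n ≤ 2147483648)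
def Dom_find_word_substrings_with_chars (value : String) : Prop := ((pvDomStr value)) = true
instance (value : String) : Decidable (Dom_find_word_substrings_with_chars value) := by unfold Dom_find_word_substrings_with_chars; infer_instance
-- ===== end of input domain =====

-- B replaces A's per-character accumulator pass by a run-based decomposition (find each
-- maximal alphabetic run, emit its growing prefixes); objective: alternative, same cost.

-- ===== PORT A =====
-- loop body of A's `for index, char in enumerate(value)`; the pyGet? default `false` is
-- unreachable: Python's `or` short-circuits when index == len_word - 1.
def pvStepA (chars : List Char) (len_word : Int) (st : List String × List Char)
    (ic : Int × Char) : List String × List Char :=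
  if PySem.Chars.isalpha ic.2 then
    let substring := st.2 ++ [ic.2]
    if ic.1 == len_word - 1
        || !(((PySem.List.pyGet? chars (ic.1 + 1)).map PySem.Chars.isdigit).getD false) then
      (st.1 ++ [String.ofList substring], substring)
    else
      (st.1, substring)
  else
    (st.1, [])

def find_word_substrings_with_chars (value : String) : List String :=
  let chars := value.toList
  let len_word := PySem.List.len chars
  ((PySem.List.enumerate chars).foldl (pvStepA chars len_word) ([], [])).1

-- ===== PORT B =====
-- Source B's outer while-loop as structural recursion: skip a non-alpha char, or consume a
-- whole maximal alphabetic run at once.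
def pvRunsB : List Char → List String
  | [] => []
  | c :: rest =>
    if PySem.Chars.isalpha c then
      let run := (c :: rest).takeWhile PySem.Chars.isalpha
      let rest' := (c :: rest).dropWhile PySem.Chars.isalpha
      let prefixes := (List.range' 1 (run.length - 1)).map (fun k => String.ofList (run.take k))
      let full :=
        match rest' with
        | [] => [String.ofList run]
        | d :: _ => if !(PySem.Chars.isdigit d) then [String.ofList run] else []
      prefixes ++ full ++ pvRunsB rest'
    else
      pvRunsB rest
termination_by l => l.length
decreasing_by
  · simp only [List.dropWhile_cons, if_pos ‹_›, List.length_cons]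
    exact Nat.lt_succ_of_le (List.length_dropWhile_le _ _)
  · simp

def find_word_substrings_with_chars_alt (value : String) : List String :=
  pvRunsB value.toList

-- ===== PRECONDITION & SPEC =====
def Spec_find_word_substrings_with_chars (value : String) (out : List String) : Prop := out = find_word_substrings_with_chars_alt value
instance (value : String) (out : List String) : Decidable (Spec_find_word_substrings_with_chars value out) := by unfold Spec_find_word_substrings_with_chars; infer_instance

-- ===== CLAIM (what is proved, stated in full; the proofs are below) =====
def Claim_equal_find_word_substrings_with_chars : Prop := ∀ (value : String), Dom_find_word_substrings_with_chars value → Spec_find_word_substrings_with_chars value (find_word_substrings_with_chars value)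

-- ===== LEMMAS AND PROOFS =====

-- Next-char formulation of A's loop: `sub` is the pending substring, the emit test reads
-- the head of the remaining suffix instead of indexing the whole string.
def pvSpecA (sub : List Char) : List Char → List String
  | [] => []
  | c :: rest =>
    if PySem.Chars.isalpha c then
      (match rest with
       | [] => [String.ofList (sub ++ [c])]
       | d :: _ => if !(PySem.Chars.isdigit d) then [String.ofList (sub ++ [c])] else [])
        ++ pvSpecA (sub ++ [c]) rest
    else
      pvSpecA [] rest

theorem pv_alpha_not_digit (c : Char) (h : PySem.Chars.isalpha c = true) :
    PySem.Chars.isdigit c = false := by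
  simp only [PySem.Chars.isalpha, PySem.Chars.isdigit, PySem.Chars.isupper, PySem.Chars.islower,
    Bool.or_eq_true, decide_eq_true_eq, Bool.and_eq_true, Bool.and_eq_false_imp,
    decide_eq_false_iff_not, not_le, Char.le_def, UInt32.le_iff_toNat_le,
    show ('A':Char).val.toNat = 65 from rfl, show ('Z':Char).val.toNat = 90 from rfl,
    show ('a':Char).val.toNat = 97 from rfl, show ('z':Char).val.toNat = 122 from rfl,
    show ('0':Char).val.toNat = 48 from rfl, show ('9':Char).val.toNat = 57 from rfl] at *
  omega

-- A's fold over the enumerated string equals pvSpecA on the remaining suffix.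
theorem pv_foldA (chars : List Char) :
    ∀ (suf pre : List Char) (acc : List String) (sub : List Char), pre ++ suf = chars →
      (List.foldl (pvStepA chars (PySem.List.len chars)) (acc, sub)
        (PySem.List.enumerate suf (pre.length : Int))).1 = acc ++ pvSpecA sub suf := by
  intro suf
  induction suf with
  | nil => intro pre acc sub _; simp [PySem.List.enumerate_nil, pvSpecA]
  | cons c rest ih =>
    intro pre acc sub hpre
    rw [PySem.List.enumerate_cons]
    simp only [List.foldl_cons]
    have hlen : (chars.length : Int) = (pre.length : Int) + 1 + rest.length := by
      rw [← hpre]; push_cast [List.length_append, List.length_cons]; ring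
    have hget : PySem.List.pyGet? chars ((pre.length : Int) + 1) = rest[0]? := by
      rw [← hpre, show ((pre.length : Int) + 1) = ((pre.length : Int) + ((1:Nat) : Int)) from by push_cast; ring,
        PySem.List.pyGet?_append_right]
      simp
    have hnext : ((pre.length : Int) + 1) = (((pre ++ [c]).length : Nat) : Int) := by
      push_cast [List.length_append, List.length_cons, List.length_nil]; ring
    by_cases ha : PySem.Chars.isalpha c = true
    · cases rest with
      | nil =>
        have hcond : (pre.length : Int) = (chars.length : Int) - 1 := by
          simp only [List.length_nil, Nat.cast_zero] at hlen; omega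
        simp [pvStepA, ha, PySem.List.len_eq, hcond, PySem.List.enumerate_nil, pvSpecA]
      | cons d t =>
        have hcond : ¬ ((pre.length : Int) = (chars.length : Int) - 1) := by
          push_cast [List.length_cons] at hlen; omega
        rw [List.getElem?_cons_zero] at hget
        have hstep : pvStepA chars (PySem.List.len chars) (acc, sub) ((pre.length : Int), c)
            = (acc ++ (if PySem.Chars.isdigit d = true then [] else [String.ofList (sub ++ [c])]),
               sub ++ [c]) := by
          by_cases hd : PySem.Chars.isdigit d = true <;>
            simp [pvStepA, ha, hget, hd, PySem.List.len_eq, hcond]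
        rw [hstep, hnext, ih (pre ++ [c]) _ (sub ++ [c]) (by simpa using hpre)]
        by_cases hd : PySem.Chars.isdigit d = true <;> simp [pvSpecA, ha, hd]
    · have ha' := eq_false_of_ne_true ha
      have hstep : pvStepA chars (PySem.List.len chars) (acc, sub) ((pre.length : Int), c)
          = (acc, []) := by simp [pvStepA, ha']
      rw [hstep, hnext, ih (pre ++ [c]) acc [] (by simpa using hpre)]
      simp [pvSpecA, ha']

-- Over a wholly-alphabetic run, pvSpecA emits the growing prefixes of sub ++ run
-- (the last one gated by the character after the run) and carries sub ++ run forward.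
theorem pv_specA_run :
    ∀ (run : List Char), run ≠ [] → (∀ x ∈ run, PySem.Chars.isalpha x = true) →
      ∀ (sub rest' : List Char),
        pvSpecA sub (run ++ rest') =
          (List.range' 1 (run.length - 1)).map (fun k => String.ofList (sub ++ run.take k))
          ++ (match rest' with
              | [] => [String.ofList (sub ++ run)]
              | d :: _ => if !(PySem.Chars.isdigit d) then [String.ofList (sub ++ run)] else [])
          ++ pvSpecA (sub ++ run) rest' := by
  intro run
  induction run with
  | nil => intro h; exact absurd rfl h
  | cons c cs ih =>
    intro _ hall sub rest'
    have hc : PySem.Chars.isalpha c = true := hall c (by simp)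
    cases cs with
    | nil =>
      cases rest' with
      | nil => simp [pvSpecA, hc]
      | cons d t => simp [pvSpecA, hc]
    | cons c2 t =>
      have hc2 : PySem.Chars.isalpha c2 = true := hall c2 (by simp)
      have hnd : PySem.Chars.isdigit c2 = false := pv_alpha_not_digit c2 hc2
      have step : pvSpecA sub ((c :: c2 :: t) ++ rest')
          = [String.ofList (sub ++ [c])] ++ pvSpecA (sub ++ [c]) ((c2 :: t) ++ rest') := by
        simp [pvSpecA, hc, hnd]
      rw [step, ih (by simp) (fun x hx => hall x (by simp [hx])) (sub ++ [c]) rest']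
      have hshift : (List.range' 1 ((c :: c2 :: t).length - 1)).map
            (fun k => String.ofList (sub ++ (c :: c2 :: t).take k))
          = String.ofList (sub ++ [c]) ::
            (List.range' 1 ((c2 :: t).length - 1)).map
              (fun k => String.ofList ((sub ++ [c]) ++ (c2 :: t).take k)) := by
        have h1 : (c :: c2 :: t).length - 1 = t.length + 1 := by simp
        have h3 : (c2 :: t).length - 1 = t.length := by simp
        have h2 : (List.range' 1 t.length).map (1 + ·) = List.range' 2 t.length :=
          List.map_add_range' (a := 1) (s := 1) (n := t.length) (step := 1)
        rw [h1, h3, List.range'_succ, List.map_cons, ← h2, List.map_map]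
        refine congrArg₂ List.cons (by simp) ?_
        exact List.map_congr_left (fun k _ => by
          simp [Nat.add_comm 1 k, List.take_succ_cons])
      rw [hshift]
      simp
-- range' 2 vs map (+1) over range' 1 needed `range'_eq_map_range`; take over cons shifts by one.

-- pvSpecA restarted on a suffix whose head is not alphabetic forgets sub.
theorem pv_specA_reset (sub : List Char) (rest' : List Char)
    (h : rest' = [] ∨ ∃ d t, rest' = d :: t ∧ PySem.Chars.isalpha d = false) :
    pvSpecA sub rest' = pvSpecA [] rest' := by
  rcases h with h | ⟨d, t, rfl, hd⟩
  · subst h; rfl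
  · simp [pvSpecA, hd]

theorem pv_specA_eq_runsB : ∀ (l : List Char), pvSpecA [] l = pvRunsB l := by
  intro l
  induction l using pvRunsB.induct with
  | case1 => simp [pvSpecA, pvRunsB]
  | case2 c rest ha _ ih =>
    have hdecomp : (c :: rest).takeWhile PySem.Chars.isalpha
        ++ (c :: rest).dropWhile PySem.Chars.isalpha = c :: rest :=
      List.takeWhile_append_dropWhile
    have hrun_ne : (c :: rest).takeWhile PySem.Chars.isalpha ≠ [] := by
      simp [ha]
    have hall : ∀ x ∈ (c :: rest).takeWhile PySem.Chars.isalpha,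
        PySem.Chars.isalpha x = true := fun x hx => List.mem_takeWhile_imp hx
    have hrest' : (c :: rest).dropWhile PySem.Chars.isalpha = []
        ∨ ∃ d t, (c :: rest).dropWhile PySem.Chars.isalpha = d :: t
            ∧ PySem.Chars.isalpha d = false := by
      cases hr : (c :: rest).dropWhile PySem.Chars.isalpha with
      | nil => exact Or.inl rfl
      | cons d t =>
        refine Or.inr ⟨d, t, rfl, ?_⟩
        have := List.head?_dropWhile_not PySem.Chars.isalpha (c :: rest)
        rw [hr] at this
        simpa using this
    have key := pv_specA_run _ hrun_ne hall []
      ((c :: rest).dropWhile PySem.Chars.isalpha)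
    rw [hdecomp] at key
    rw [key, pv_specA_reset _ _ hrest', ih]
    conv_rhs => rw [pvRunsB.eq_def]
    simp only [ha, if_true, List.nil_append, List.append_assoc]
    rfl
  | case3 c rest ha ih =>
    have hB : pvRunsB (c :: rest) = pvRunsB rest := by
      conv_lhs => rw [pvRunsB.eq_def]
      simp [eq_false_of_ne_true ha]
    rw [hB]
    simpa [pvSpecA, eq_false_of_ne_true ha] using ih

-- ===== VERDICT (by name: the statement is the Claim_ definition above) =====
theorem find_word_substrings_with_chars_spec : Claim_equal_find_word_substrings_with_chars := by
  intro value _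
  unfold Spec_find_word_substrings_with_chars find_word_substrings_with_chars
    find_word_substrings_with_chars_alt
  have h := pv_foldA value.toList value.toList [] [] [] rfl
  simp only [List.length_nil, Nat.cast_zero, List.nil_append] at h
  rw [h, pv_specA_eq_runsB]
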